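-- pv_equiv track=rewrite | github.com/Cycyber/CCPS109---Computer-Science-1 | labs109.py | words_with_letters
-- ===== SOURCE A (Python) =====
-- def words_with_letters(words, letters):
--     result_list = []
--     for word in words:
--         wordc = 0
--         letterc = 0
--         while wordc != len(word) and letterc != len(letters):
--             if word[wordc] == letters[letterc]:
--                 letterc += 1
--             wordc += 1
--         if letterc == len(letters):
--             result_list.append(word)
--     return result_list
-- ===== SOURCE B (Python) =====
-- def words_with_letters(words, letters):
--     def has_subseq(word):
--         # inverted index: each char -> increasing list of its positions in word
--         pos = {}
--         for i, ch in enumerate(word):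
--             pos.setdefault(ch, []).append(i)
--         cur = 0
--         for c in letters:
--             lst = pos.get(c, [])
--             lo, hi = 0, len(lst)
--             while lo < hi:           # binary search: first position >= cur
--                 mid = (lo + hi) // 2
--                 if lst[mid] < cur:
--                     lo = mid + 1
--                 else:
--                     hi = mid
--             if lo == len(lst):
--                 return False
--             cur = lst[lo] + 1
--         return True
--     return [w for w in words if has_subseq(w)]
-- ===== Notes on version B (the rewrite author's own statement) =====
-- stated objective: alternative
-- what changed: Replaces the two-pointer linear scan per word with an inverted index (char -> increasing list of positions built once per word) queried by binary search for the first position at or after the cursor, one query per letter.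
import Mathlib
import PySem

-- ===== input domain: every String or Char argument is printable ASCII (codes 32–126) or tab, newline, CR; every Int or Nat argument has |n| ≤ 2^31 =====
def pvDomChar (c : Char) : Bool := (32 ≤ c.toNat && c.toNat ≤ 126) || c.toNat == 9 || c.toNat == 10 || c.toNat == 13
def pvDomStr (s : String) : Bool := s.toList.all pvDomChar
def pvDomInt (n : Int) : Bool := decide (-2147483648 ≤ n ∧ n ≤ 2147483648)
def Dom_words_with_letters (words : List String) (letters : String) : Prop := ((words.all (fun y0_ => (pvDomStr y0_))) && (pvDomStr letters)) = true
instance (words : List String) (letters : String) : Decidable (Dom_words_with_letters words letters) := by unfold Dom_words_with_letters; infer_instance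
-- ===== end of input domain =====

-- B replaces A's two-pointer scan per word with a char->positions inverted index queried by binary search (alternative structure, similar cost); equality of outputs is proved on the whole domain.


-- ===== PORT A =====
-- A's while loop: walk the word's chars (wordc advancing each step), letterc an index into letters;
-- stop when the word is exhausted or letterc = len(letters); returns the final letterc.
def wlLoopA (ls : List Char) : List Char → Nat → Nat
  | [], lc => lc
  | w :: ws, lc =>
    if lc = ls.length then lc
    else wlLoopA ls ws (if ls.getD lc default = w then lc + 1 else lc)

def words_with_letters (words : List String) (letters : String) : List String :=
  words.foldl (fun result_list word =>
    if wlLoopA letters.toList word.toList 0 = letters.toList.length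
    then result_list ++ [word] else result_list) []

-- ===== PORT B =====
-- pos = {}; for i, ch in enumerate(word): pos.setdefault(ch, []).append(i)
def wlBuildPos (ws : List Char) : PySem.Dict Char (List Int) :=
  (PySem.List.enumerate ws 0).foldl (fun d p => d.modify p.2 [] (· ++ [p.1])) PySem.Dict.empty

-- the hand-written while loop: first index lo in [lo, hi) with lst[lo] >= cur (lst[mid] is in range
-- whenever lo < hi ≤ len lst, so getD is exact for Python's lst[mid] here)
def wlBsearch (lst : List Int) (cur : Int) (lo hi : Nat) : Nat :=
  if lo < hi then
    let mid := (lo + hi) / 2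
    if lst.getD mid 0 < cur then wlBsearch lst cur (mid + 1) hi
    else wlBsearch lst cur lo mid
  else lo
termination_by hi - lo
decreasing_by all_goals omega

-- for c in letters: lst = pos.get(c, []); binary search; fail, or advance cur past the found position
def wlOkB (pos : PySem.Dict Char (List Int)) : List Char → Int → Bool
  | [], _ => true
  | c :: ls, cur =>
    let lst := pos.getD c []
    let lo := wlBsearch lst cur 0 lst.length
    if lo = lst.length then false
    else wlOkB pos ls (lst.getD lo 0 + 1)

def words_with_letters_alt (words : List String) (letters : String) : List String :=
  words.filter (fun w => wlOkB (wlBuildPos w.toList) letters.toList 0)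

-- ===== PRECONDITION & SPEC =====
def Spec_words_with_letters (words : List String) (letters : String) (out : List String) : Prop := out = words_with_letters_alt words letters
instance (words : List String) (letters : String) (out : List String) : Decidable (Spec_words_with_letters words letters out) := by unfold Spec_words_with_letters; infer_instance

-- ===== CLAIM (what is proved, stated in full; the proofs are below) =====
def Claim_equal_words_with_letters : Prop := ∀ (words : List String) (letters : String), Dom_words_with_letters words letters → Spec_words_with_letters words letters (words_with_letters words letters)

-- ===== LEMMAS AND PROOFS =====

-- intermediate greedy form: letters-driven consumption of the word (proof device linking the two ports)
def wlConsume (c : Char) : List Char → Option (List Char)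
  | [] => none
  | x :: xs => if x = c then some xs else wlConsume c xs

def wlCheck : List Char → List Char → Bool
  | [], _ => true
  | c :: ls, ws =>
    match wlConsume c ws with
    | none => false
    | some ws' => wlCheck ls ws'

-- A's two-pointer scan reaches the end of letters iff greedy consumption of the remaining letters succeeds
theorem wlLoopA_eq_check (ls : List Char) (ws : List Char) :
    ∀ lc, lc ≤ ls.length →
      (wlLoopA ls ws lc = ls.length ↔ wlCheck (ls.drop lc) ws = true) := by
  induction ws with
  | nil =>
    intro lc hlc
    simp only [wlLoopA]
    constructor
    · intro h; subst h; simp [wlCheck]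
    · intro h
      by_contra hne
      have hlt : lc < ls.length := lt_of_le_of_ne hlc hne
      have hdrop : ls.drop lc = ls[lc] :: ls.drop (lc + 1) :=
        List.drop_eq_getElem_cons hlt
      rw [hdrop] at h
      simp [wlCheck, wlConsume] at h
  | cons w ws ih =>
    intro lc hlc
    by_cases he : lc = ls.length
    · subst he
      simp [wlLoopA, wlCheck]
    · have hlt : lc < ls.length := lt_of_le_of_ne hlc he
      have hdrop : ls.drop lc = ls[lc] :: ls.drop (lc + 1) :=
        List.drop_eq_getElem_cons hlt
      rw [wlLoopA, if_neg he, hdrop]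
      by_cases hc : ls.getD lc default = w
      · have hg : ls[lc] = w := by
          rw [← hc]; simp [List.getD_eq_getElem?_getD, hlt]
        rw [if_pos hc, hg]
        have h1 := ih (lc + 1) (by omega)
        rw [h1]
        simp [wlCheck, wlConsume]
      · have hg : ¬ (w = ls[lc]) := by
          intro h; apply hc
          rw [h]; simp [List.getD_eq_getElem?_getD, hlt]
        rw [if_neg hc]
        have hstep : wlCheck (ls[lc] :: ls.drop (lc + 1)) (w :: ws)
            = wlCheck (ls[lc] :: ls.drop (lc + 1)) ws := by
          simp only [wlCheck, wlConsume]
          rw [if_neg hg]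
        rw [hstep, ih lc hlc, hdrop]

-- the positions list B's index holds for a char c
def wlP (ws : List Char) (c : Char) : List Int :=
  ((PySem.List.enumerate ws 0).filter (fun p => p.2 == c)).map (·.1)

theorem wlBuildPos_getD (ws : List Char) (c : Char) :
    (wlBuildPos ws).getD c [] = wlP ws c := by
  unfold wlBuildPos wlP
  have h : (PySem.List.enumerate ws 0).foldl (fun d p => d.modify p.2 [] (· ++ [p.1])) PySem.Dict.empty
      = ((PySem.List.enumerate ws 0).map (fun p => (p.2, p.1))).foldl (fun d q => d.modify q.1 [] (· ++ [q.2])) PySem.Dict.empty := by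
    rw [List.foldl_map]
  rw [h, PySem.Dict.getD_foldl_modify_append]
  simp [List.filter_map, Function.comp_def, List.map_map]

theorem wlP_sorted (ws : List Char) (c : Char) : (wlP ws c).Pairwise (· ≤ ·) := by
  unfold wlP
  exact List.Pairwise.map _ (fun a b h => le_of_lt h)
    (((PySem.List.pairwise_lt_enumerate ws 0)).filter _)

theorem wlP_mem (ws : List Char) (c : Char) (j : Int) :
    j ∈ wlP ws c ↔ ∃ (k : Nat), ∃ (h : k < ws.length), j = (k : Int) ∧ ws[k] = c := by
  unfold wlP
  simp only [List.mem_map, List.mem_filter]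
  constructor
  · rintro ⟨p, ⟨hp, hc⟩, rfl⟩
    rw [PySem.List.mem_enumerate_iff] at hp
    obtain ⟨k, hk, rfl⟩ := hp
    exact ⟨k, hk, by simp, by simpa using hc⟩
  · rintro ⟨k, hk, rfl, hc⟩
    exact ⟨((k:Int), ws[k]), ⟨by rw [PySem.List.mem_enumerate_iff]; exact ⟨k, hk, by simp⟩, by simpa using hc⟩, rfl⟩

theorem wlConsume_none (c : Char) (xs : List Char) (h : c ∉ xs) : wlConsume c xs = none := by
  induction xs with
  | nil => rfl
  | cons x xs ih =>
    simp only [wlConsume]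
    rw [if_neg, ih (by simp at h; exact h.2)]
    intro he; exact h (he ▸ List.mem_cons_self ..)

theorem wlGetD_mono (lst : List Int) (hs : lst.Pairwise (· ≤ ·)) (i j : Nat)
    (hij : i ≤ j) (hj : j < lst.length) : lst.getD i 0 ≤ lst.getD j 0 := by
  rcases eq_or_lt_of_le hij with rfl | hlt
  · exact le_rfl
  · rw [List.getD_eq_getElem _ _ (lt_of_le_of_lt hij hj), List.getD_eq_getElem _ _ hj]
    exact List.pairwise_iff_getElem.mp hs i j _ hj hlt

theorem wlBsearch_spec (lst : List Int) (cur : Int) (hs : lst.Pairwise (· ≤ ·)) :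
    ∀ lo hi, lo ≤ hi → hi ≤ lst.length →
      (∀ i, i < lo → lst.getD i 0 < cur) →
      (∀ i, hi ≤ i → i < lst.length → cur ≤ lst.getD i 0) →
      wlBsearch lst cur lo hi ≤ lst.length ∧
      (∀ i, i < wlBsearch lst cur lo hi → lst.getD i 0 < cur) ∧
      (∀ i, wlBsearch lst cur lo hi ≤ i → i < lst.length → cur ≤ lst.getD i 0) := by
  intro lo hi
  induction hn : hi - lo using Nat.strong_induction_on generalizing lo hi with
  | _ n ih =>
  intro hlh hhl hlow hhigh
  rw [wlBsearch]
  by_cases h : lo < hi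
  · rw [if_pos h]
    set mid := (lo + hi) / 2 with hmid
    have hm1 : lo ≤ mid := by omega
    have hm2 : mid < hi := by omega
    by_cases hc : lst.getD mid 0 < cur
    · rw [if_pos hc]
      refine ih (hi - (mid+1)) (by omega) (mid+1) hi rfl (by omega) hhl ?_ hhigh
      intro i hi2
      exact lt_of_le_of_lt (wlGetD_mono lst hs i mid (by omega) (by omega)) hc
    · rw [if_neg hc]
      have hc2 : cur ≤ lst.getD mid 0 := not_lt.mp hc
      refine ih (mid - lo) (by omega) lo mid rfl (by omega) (by omega) hlow ?_
      intro i hmi hil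
      exact le_trans hc2 (wlGetD_mono lst hs mid i hmi hil)
  · rw [if_neg h]
    have : lo = hi := by omega
    subst this
    exact ⟨hhl, hlow, hhigh⟩

theorem wlConsume_some (ws : List Char) (c : Char) (k : Nat) (hk : k < ws.length) (hc : ws[k] = c) :
    ∀ n, n ≤ k → (∀ m, n ≤ m → m < k → ∀ (hm : m < ws.length), ws[m] ≠ c) →
      wlConsume c (ws.drop n) = some (ws.drop (k + 1)) := by
  intro n
  induction hd : k - n using Nat.strong_induction_on generalizing n with
  | _ d ih =>
  intro hnk hbefore
  have hn : n < ws.length := lt_of_le_of_lt hnk hk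
  rw [List.drop_eq_getElem_cons hn]
  rcases eq_or_lt_of_le hnk with rfl | hlt
  · simp only [wlConsume, if_pos hc]
  · simp only [wlConsume]
    rw [if_neg (hbefore n le_rfl hlt hn)]
    exact ih (k - (n+1)) (by omega) (n+1) rfl (by omega)
      (fun m hm1 hm2 hm3 => hbefore m (by omega) hm2 hm3)

-- main bridge: B's indexed binary search over letters equals greedy consumption of the word's suffix
theorem wlOkB_eq_check (ws : List Char) (ls : List Char) :
    ∀ (cur : Int), 0 ≤ cur → wlOkB (wlBuildPos ws) ls cur = wlCheck ls (ws.drop cur.toNat) := by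
  induction ls with
  | nil => intro cur _; simp [wlOkB, wlCheck]
  | cons c ls ih =>
    intro cur hcur
    have hcast : ((cur.toNat : Int)) = cur := Int.toNat_of_nonneg hcur
    simp only [wlOkB, wlBuildPos_getD]
    set lst := wlP ws c with hlst
    have hs := wlP_sorted ws c
    obtain ⟨hr1, hlow, hhigh⟩ := wlBsearch_spec lst cur hs 0 lst.length (Nat.zero_le _)
      le_rfl (by omega) (by omega)
    set r := wlBsearch lst cur 0 lst.length with hrdef
    by_cases hr : r = lst.length
    · rw [if_pos hr]
      have hnone : wlConsume c (ws.drop cur.toNat) = none := by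
        apply wlConsume_none
        intro hmem
        obtain ⟨i, hi, hie⟩ := List.mem_iff_getElem.mp hmem
        have hilen : cur.toNat + i < ws.length := by
          have := hi; rw [List.length_drop] at this; omega
        have hwk : ws[cur.toNat + i] = c := by
          rw [← hie]; rw [List.getElem_drop]
        have hmemP : ((cur.toNat + i : Nat) : Int) ∈ lst :=
          (wlP_mem ws c _).mpr ⟨cur.toNat + i, hilen, rfl, hwk⟩
        obtain ⟨idx, hidx, hidxe⟩ := List.mem_iff_getElem.mp hmemP
        have := hlow idx (hr ▸ hidx)
        rw [List.getD_eq_getElem _ _ hidx, hidxe] at this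
        omega
      simp only [wlCheck, hnone]
    · rw [if_neg hr]
      have hrlen : r < lst.length := lt_of_le_of_ne hr1 hr
      have hj : lst.getD r 0 = lst[r] := List.getD_eq_getElem _ _ hrlen
      have hmem : lst[r] ∈ lst := List.getElem_mem hrlen
      obtain ⟨k, hk, hke, hwc⟩ := (wlP_mem ws c _).mp hmem
      have hcurj : cur ≤ lst[r] := by have := hhigh r le_rfl hrlen; rwa [hj] at this
      have hcurk : cur.toNat ≤ k := by omega
      have hmin : ∀ m, cur.toNat ≤ m → m < k → ∀ (hm : m < ws.length), ws[m] ≠ c := by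
        intro m hm1 hm2 hm3 hmc
        have hmemP : ((m : Nat) : Int) ∈ lst := (wlP_mem ws c _).mpr ⟨m, hm3, rfl, hmc⟩
        obtain ⟨idx, hidx, hidxe⟩ := List.mem_iff_getElem.mp hmemP
        by_cases hir : idx < r
        · have := hlow idx hir
          rw [List.getD_eq_getElem _ _ hidx, hidxe] at this
          omega
        · have := wlGetD_mono lst hs r idx (by omega) hidx
          rw [hj, List.getD_eq_getElem _ _ hidx, hidxe] at this
          omega
      have hsome := wlConsume_some ws c k hk hwc cur.toNat hcurk hmin
      have hstep : wlCheck (c :: ls) (ws.drop cur.toNat) = wlCheck ls (ws.drop (k + 1)) := by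
        simp only [wlCheck, hsome]
      rw [hstep, hj, hke]
      have hnext := ih ((k : Int) + 1) (by omega)
      rw [hnext]
      have ht : ((k : Int) + 1).toNat = k + 1 := by omega
      rw [ht]

-- ===== VERDICT (by name: the statement is the Claim_ definition above) =====
theorem words_with_letters_spec : Claim_equal_words_with_letters := by
  intro words letters _
  unfold Spec_words_with_letters words_with_letters words_with_letters_alt
  rw [PySem.List.foldl_append_ite_eq_filter]
  rw [List.nil_append]
  apply List.filter_congr
  intro w _
  have hA := wlLoopA_eq_check letters.toList w.toList 0 (Nat.zero_le _)
  simp only [List.drop_zero] at hA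
  have hB := wlOkB_eq_check w.toList letters.toList 0 le_rfl
  simp only [Int.toNat_zero, List.drop_zero] at hB
  rw [hB]
  by_cases hb : wlCheck letters.toList w.toList = true
  · simp [hb, hA.mpr hb]
  · simp [hb]
    intro hh
    exact hb (hA.mp hh)
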